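-- pv_equiv track=rewrite | github.com/takutosquare00-max/jlpt-kakunin-test | Minnanonihongo/shared/fukushu_lead_unit31.py | fukushu_section_lead_for_range
-- ===== SOURCE A (Python) =====
-- def _fukushu_q_kind(q: int) -> str:
--     """復習通し番号（1…40）に対応する設問タイプ（リード文切り替え用）。"""
--     if 1 <= q <= 14 or 20 <= q <= 24:
--         return "ikou"
--     if 15 <= q <= 19:
--         return "kaiwa"
--     if 25 <= q <= 28:
--         return "bun_omo"
--     if 29 <= q <= 32:
--         return "bun_tsumori"
--     if 33 <= q <= 36:
--         return "hyou"
--     if 37 <= q <= 40: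
--         return "dokkai"
--     return "ikou"
--
-- def _dedupe_consecutive_lines(lines: list[str]) -> list[str]:
--     out: list[str] = []
--     for line in lines:
--         if not out or out[-1] != line:
--             out.append(line)
--     return out
--
-- FUKUSHU_LEAD_FRAGMENTS: dict[str, str] = {
--     "ikou": (
--         "「〜ます」の<ruby>形<rt>かたち</rt></ruby>に<ruby>対応<rt>たいおう</rt></ruby>する"
--         "<ruby>意向形<rt>いこうけい</rt></ruby>を<ruby>選<rt>えら</rt></ruby>びましょう。"
--     ),
--     "kaiwa": (
--         "<ruby>会話<rt>かいわ</rt></ruby>の（　）に<ruby>入<rt>はい</rt></ruby>る"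
--         "<ruby>正<rt>ただ</rt></ruby>しいものはどれですか。"
--     ),
--     "bun_omo": (
--         "<ruby>文<rt>ぶん</rt></ruby>の（　）に<ruby>入<rt>はい</rt></ruby>る"
--         "<ruby>正<rt>ただ</rt></ruby>しいものを<ruby>選<rt>えら</rt></ruby>びましょう。"
--     ),
--     "bun_tsumori": (
--         "<ruby>文<rt>ぶん</rt></ruby>の（　）に<ruby>入<rt>はい</rt></ruby>る"
--         "<ruby>正<rt>ただ</rt></ruby>しいものを<ruby>選<rt>えら</rt></ruby>びましょう。"
--     ),
--     "hyou": (
--         "<ruby>表<rt>ひょう</rt></ruby>の<ruby>内容<rt>ないよう</rt></ruby>に"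
--         "<ruby>合<rt>あ</rt></ruby>う<ruby>答<rt>こた</rt></ruby>えを<ruby>選<rt>えら</rt></ruby>びましょう。"
--     ),
--     "dokkai": (
--         "<ruby>読<rt>よ</rt></ruby>んだ<ruby>文章<rt>ぶんしょう</rt></ruby>の<ruby>内容<rt>ないよう</rt></ruby>に"
--         "<ruby>合<rt>あ</rt></ruby>うものを<ruby>選<rt>えら</rt></ruby>びましょう。"
--     ),
-- }
--
-- def fukushu_section_lead_for_range(f_lo: int, f_hi: int) -> str:
--     """パート内の復習タイプに応じた説明文（連続ブロック単位でまとめ、<br> で接続）。"""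
--     seen: list[str] = []
--     prev: str | None = None
--     for q in range(f_lo, f_hi + 1):
--         k = _fukushu_q_kind(q)
--         if k != prev:
--             seen.append(k)
--             prev = k
--     lines = _dedupe_consecutive_lines([FUKUSHU_LEAD_FRAGMENTS[k] for k in seen])
--     return "<br>".join(lines)
-- ===== SOURCE B (Python) =====
-- # O(1) re-implementation: walk the 8 fixed kind zones overlapping [f_lo, f_hi]
-- # instead of every integer in the range.
--
-- _FUKUSHU_ZONE_BOUNDS = [15, 20, 25, 29, 33, 37, 41]
-- _FUKUSHU_ZONE_KINDS = [
--     "ikou", "kaiwa", "ikou", "bun_omo", "bun_tsumori", "hyou", "dokkai", "ikou",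
-- ]
--
-- _FUKUSHU_LEADS = {
--     "ikou": (
--         "「〜ます」の<ruby>形<rt>かたち</rt></ruby>に<ruby>対応<rt>たいおう</rt></ruby>する"
--         "<ruby>意向形<rt>いこうけい</rt></ruby>を<ruby>選<rt>えら</rt></ruby>びましょう。"
--     ),
--     "kaiwa": (
--         "<ruby>会話<rt>かいわ</rt></ruby>の（　）に<ruby>入<rt>はい</rt></ruby>る"
--         "<ruby>正<rt>ただ</rt></ruby>しいものはどれですか。"
--     ),
--     "bun_omo": (
--         "<ruby>文<rt>ぶん</rt></ruby>の（　）に<ruby>入<rt>はい</rt></ruby>る"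
--         "<ruby>正<rt>ただ</rt></ruby>しいものを<ruby>選<rt>えら</rt></ruby>びましょう。"
--     ),
--     "bun_tsumori": (
--         "<ruby>文<rt>ぶん</rt></ruby>の（　）に<ruby>入<rt>はい</rt></ruby>る"
--         "<ruby>正<rt>ただ</rt></ruby>しいものを<ruby>選<rt>えら</rt></ruby>びましょう。"
--     ),
--     "hyou": (
--         "<ruby>表<rt>ひょう</rt></ruby>の<ruby>内容<rt>ないよう</rt></ruby>に"
--         "<ruby>合<rt>あ</rt></ruby>う<ruby>答<rt>こた</rt></ruby>えを<ruby>選<rt>えら</rt></ruby>びましょう。"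
--     ),
--     "dokkai": (
--         "<ruby>読<rt>よ</rt></ruby>んだ<ruby>文章<rt>ぶんしょう</rt></ruby>の<ruby>内容<rt>ないよう</rt></ruby>に"
--         "<ruby>合<rt>あ</rt></ruby>うものを<ruby>選<rt>えら</rt></ruby>びましょう。"
--     ),
-- }
--
--
-- def _zone_index(q: int) -> int:
--     """Index of the kind zone containing q: number of zone boundaries <= q."""
--     n = 0
--     for b in _FUKUSHU_ZONE_BOUNDS:
--         if b <= q:
--             n += 1
--     return n
--
--
-- def fukushu_section_lead_for_range(f_lo: int, f_hi: int) -> str: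
--     if f_hi < f_lo:
--         return ""
--     kinds = _FUKUSHU_ZONE_KINDS[_zone_index(f_lo):_zone_index(f_hi) + 1]
--     lines: list[str] = []
--     for text in (_FUKUSHU_LEADS[k] for k in kinds):
--         if not lines or lines[-1] != text:
--             lines.append(text)
--     return "<br>".join(lines)
-- ===== Notes on version B (the rewrite author's own statement) =====
-- stated objective: faster
-- what changed: Instead of walking every integer q in [f_lo, f_hi] and classifying it, B walks the 8 fixed kind zones: it computes the zone index of f_lo and f_hi in O(1) and takes the corresponding contiguous slice of the zone-kind table (adjacent zones always have distinct kinds), then applies the same fragment-dedupe join.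
import Mathlib
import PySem

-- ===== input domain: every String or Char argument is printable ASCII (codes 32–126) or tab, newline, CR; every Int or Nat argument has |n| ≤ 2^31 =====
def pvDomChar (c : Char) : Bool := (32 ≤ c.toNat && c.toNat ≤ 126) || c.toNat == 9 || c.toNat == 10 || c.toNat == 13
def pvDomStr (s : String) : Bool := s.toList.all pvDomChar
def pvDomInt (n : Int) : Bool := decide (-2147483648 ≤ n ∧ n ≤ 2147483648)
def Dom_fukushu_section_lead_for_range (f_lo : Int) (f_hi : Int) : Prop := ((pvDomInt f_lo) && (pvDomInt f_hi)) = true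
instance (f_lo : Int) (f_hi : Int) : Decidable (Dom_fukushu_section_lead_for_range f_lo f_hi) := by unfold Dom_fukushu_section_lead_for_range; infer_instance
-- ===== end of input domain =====

-- B replaces A's per-integer walk over [f_lo, f_hi] with an O(1) lookup of the fixed
-- kind-zone table (zone index of each endpoint, then a slice of the zone kinds).

-- ===== PORT A =====
def fukushuQKind (q : Int) : String :=
  if (1 ≤ q ∧ q ≤ 14) ∨ (20 ≤ q ∧ q ≤ 24) then "ikou"
  else if 15 ≤ q ∧ q ≤ 19 then "kaiwa"
  else if 25 ≤ q ∧ q ≤ 28 then "bun_omo"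
  else if 29 ≤ q ∧ q ≤ 32 then "bun_tsumori"
  else if 33 ≤ q ∧ q ≤ 36 then "hyou"
  else if 37 ≤ q ∧ q ≤ 40 then "dokkai"
  else "ikou"

def dedupeConsecutiveLines (lines : List String) : List String :=
  lines.foldl
    (fun out line =>
      if out = [] ∨ PySem.List.pyGet? out (-1) ≠ some line then out ++ [line] else out)
    []

def fukushuLeadFragments : PySem.Dict String String :=
  PySem.Dict.ofList
    [ ("ikou", "「〜ます」の<ruby>形<rt>かたち</rt></ruby>に<ruby>対応<rt>たいおう</rt></ruby>する<ruby>意向形<rt>いこうけい</rt></ruby>を<ruby>選<rt>えら</rt></ruby>びましょう。"),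
      ("kaiwa", "<ruby>会話<rt>かいわ</rt></ruby>の（　）に<ruby>入<rt>はい</rt></ruby>る<ruby>正<rt>ただ</rt></ruby>しいものはどれですか。"),
      ("bun_omo", "<ruby>文<rt>ぶん</rt></ruby>の（　）に<ruby>入<rt>はい</rt></ruby>る<ruby>正<rt>ただ</rt></ruby>しいものを<ruby>選<rt>えら</rt></ruby>びましょう。"),
      ("bun_tsumori", "<ruby>文<rt>ぶん</rt></ruby>の（　）に<ruby>入<rt>はい</rt></ruby>る<ruby>正<rt>ただ</rt></ruby>しいものを<ruby>選<rt>えら</rt></ruby>びましょう。"),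
      ("hyou", "<ruby>表<rt>ひょう</rt></ruby>の<ruby>内容<rt>ないよう</rt></ruby>に<ruby>合<rt>あ</rt></ruby>う<ruby>答<rt>こた</rt></ruby>えを<ruby>選<rt>えら</rt></ruby>びましょう。"),
      ("dokkai", "<ruby>読<rt>よ</rt></ruby>んだ<ruby>文章<rt>ぶんしょう</rt></ruby>の<ruby>内容<rt>ないよう</rt></ruby>に<ruby>合<rt>あ</rt></ruby>うものを<ruby>選<rt>えら</rt></ruby>びましょう。") ]

-- FUKUSHU_LEAD_FRAGMENTS[k]: k is always a key of the dict (fukushuQKind only returns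
-- those six strings), so Python's KeyError is unreachable; getD "" is exact here.
def fukushu_section_lead_for_range (f_lo : Int) (f_hi : Int) : String :=
  let seen :=
    ((PySem.List.pyRange f_lo (f_hi + 1) 1).foldl
      (fun (st : List String × Option String) q =>
        let k := fukushuQKind q
        if some k ≠ st.2 then (st.1 ++ [k], some k) else st)
      ([], none)).1
  let lines := dedupeConsecutiveLines (seen.map (fun k => (fukushuLeadFragments.get? k).getD ""))
  PySem.Str.join "<br>" lines

-- ===== PORT B =====
def fukushuZoneBounds : List Int := [15, 20, 25, 29, 33, 37, 41]

def fukushuZoneKinds : List String :=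
  ["ikou", "kaiwa", "ikou", "bun_omo", "bun_tsumori", "hyou", "dokkai", "ikou"]

def fukushuLeadsB : PySem.Dict String String :=
  PySem.Dict.ofList
    [ ("ikou", "「〜ます」の<ruby>形<rt>かたち</rt></ruby>に<ruby>対応<rt>たいおう</rt></ruby>する<ruby>意向形<rt>いこうけい</rt></ruby>を<ruby>選<rt>えら</rt></ruby>びましょう。"),
      ("kaiwa", "<ruby>会話<rt>かいわ</rt></ruby>の（　）に<ruby>入<rt>はい</rt></ruby>る<ruby>正<rt>ただ</rt></ruby>しいものはどれですか。"),
      ("bun_omo", "<ruby>文<rt>ぶん</rt></ruby>の（　）に<ruby>入<rt>はい</rt></ruby>る<ruby>正<rt>ただ</rt></ruby>しいものを<ruby>選<rt>えら</rt></ruby>びましょう。"),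
      ("bun_tsumori", "<ruby>文<rt>ぶん</rt></ruby>の（　）に<ruby>入<rt>はい</rt></ruby>る<ruby>正<rt>ただ</rt></ruby>しいものを<ruby>選<rt>えら</rt></ruby>びましょう。"),
      ("hyou", "<ruby>表<rt>ひょう</rt></ruby>の<ruby>内容<rt>ないよう</rt></ruby>に<ruby>合<rt>あ</rt></ruby>う<ruby>答<rt>こた</rt></ruby>えを<ruby>選<rt>えら</rt></ruby>びましょう。"),
      ("dokkai", "<ruby>読<rt>よ</rt></ruby>んだ<ruby>文章<rt>ぶんしょう</rt></ruby>の<ruby>内容<rt>ないよう</rt></ruby>に<ruby>合<rt>あ</rt></ruby>うものを<ruby>選<rt>えら</rt></ruby>びましょう。") ]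

def fukushuZoneIndex (q : Int) : Int :=
  fukushuZoneBounds.foldl (fun n b => if b ≤ q then n + 1 else n) 0

-- _FUKUSHU_LEADS[k]: every element of the zone-kind table is a key, KeyError unreachable.
def fukushu_section_lead_for_range_alt (f_lo : Int) (f_hi : Int) : String :=
  if f_hi < f_lo then ""
  else
    let kinds := PySem.List.slice fukushuZoneKinds
      (some (fukushuZoneIndex f_lo)) (some (fukushuZoneIndex f_hi + 1))
    let lines :=
      (kinds.map (fun k => (fukushuLeadsB.get? k).getD "")).foldl
        (fun out text =>
          if out = [] ∨ PySem.List.pyGet? out (-1) ≠ some text then out ++ [text] else out)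
        []
    PySem.Str.join "<br>" lines

-- ===== PRECONDITION & SPEC =====
def Spec_fukushu_section_lead_for_range (f_lo : Int) (f_hi : Int) (out : String) : Prop := out = fukushu_section_lead_for_range_alt f_lo f_hi
instance (f_lo : Int) (f_hi : Int) (out : String) : Decidable (Spec_fukushu_section_lead_for_range f_lo f_hi out) := by unfold Spec_fukushu_section_lead_for_range; infer_instance

-- ===== CLAIM (what is proved, stated in full; the proofs are below) =====
def Claim_equal_fukushu_section_lead_for_range : Prop := ∀ (f_lo : Int) (f_hi : Int), Dom_fukushu_section_lead_for_range f_lo f_hi → Spec_fukushu_section_lead_for_range f_lo f_hi (fukushu_section_lead_for_range f_lo f_hi)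

-- ===== LEMMAS AND PROOFS =====

-- run-collapsing view of A's (seen, prev) loop
def ddFrom : Option String → List String → List String
  | _, [] => []
  | p, x :: t => if some x = p then ddFrom p t else x :: ddFrom (some x) t

theorem seen_foldl (l : List Int) (s : List String) (p : Option String) :
    (l.foldl
      (fun (st : List String × Option String) q =>
        let k := fukushuQKind q
        if some k ≠ st.2 then (st.1 ++ [k], some k) else st)
      (s, p)).1
    = s ++ ddFrom p (l.map fukushuQKind) := by
  induction l generalizing s p with
  | nil => simp [ddFrom]
  | cons x t ih =>
    have ih' : ∀ (s : List String) (p : Option String),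
        (List.foldl
          (fun (st : List String × Option String) q =>
            if some (fukushuQKind q) = st.2 then st
            else (st.1 ++ [fukushuQKind q], some (fukushuQKind q)))
          (s, p) t).1 = s ++ ddFrom p (t.map fukushuQKind) := by
      intro s p; simpa using ih s p
    simp only [List.foldl_cons, List.map_cons, ddFrom]
    by_cases h : some (fukushuQKind x) = p
    · simp [h, ih']
    · simp [h, ih']

theorem ddrep (c : String) (n : Nat) (p : Option String) (m : List String) :
    ddFrom p (List.replicate n c ++ (c :: m)) = ddFrom p (c :: m) := by
  induction n generalizing p with
  | zero => simp
  | succ n ih =>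
    rw [List.replicate_succ, List.cons_append]
    show ddFrom p (c :: (List.replicate n c ++ c :: m)) = ddFrom p (c :: m)
    by_cases h : some c = p
    · simp [ddFrom, h, ih]
    · simp [ddFrom, h, ih]

theorem ddrepR (c : String) (n : Nat) (l : List String) (p : Option String) :
    ddFrom p (l ++ c :: List.replicate n c) = ddFrom p (l ++ [c]) := by
  induction l generalizing p with
  | nil =>
    simp only [List.nil_append]
    rw [show (c :: List.replicate n c : List String) = List.replicate n c ++ [c] from by
      rw [← List.replicate_succ, List.replicate_succ']]
    exact ddrep c n p []
  | cons x t ih =>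
    simp only [List.cons_append, ddFrom]
    by_cases h : some x = p
    · simp [h, ih]
    · simp [h, ih]

theorem const_map (f : Int → String) (a b : Int) (c : String)
    (h : ∀ q, a ≤ q → q < b → f q = c) :
    (PySem.List.pyRange a b 1).map f = List.replicate (b - a).toNat c := by
  rw [PySem.List.pyRange_one, List.map_map]
  refine List.eq_replicate_iff.mpr ⟨by simp, ?_⟩
  intro x hx
  rcases List.mem_map.mp hx with ⟨k, hk, rfl⟩
  have hk' : k < (b - a).toNat := List.mem_range.mp hk
  show f (a + k) = c
  exact h _ (by omega) (by omega)

theorem kind_nonpos (q : Int) (h : q ≤ 0) : fukushuQKind q = "ikou" := by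
  unfold fukushuQKind
  split_ifs with h1 h2 h3 h4 h5 h6 <;> first | rfl | omega

theorem kind_ge (q : Int) (h : 41 ≤ q) : fukushuQKind q = "ikou" := by
  unfold fukushuQKind
  split_ifs with h1 h2 h3 h4 h5 h6 <;> first | rfl | omega

def clampQ (q : Int) : Int := max 0 (min q 41)

theorem zi_clamp (q : Int) : fukushuZoneIndex q = fukushuZoneIndex (clampQ q) := by
  by_cases h0 : q < 0
  · have e : clampQ q = 0 := by unfold clampQ; omega
    rw [e]
    simp [fukushuZoneIndex, fukushuZoneBounds,
      show ¬(15 ≤ q) from by omega, show ¬(20 ≤ q) from by omega,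
      show ¬(25 ≤ q) from by omega, show ¬(29 ≤ q) from by omega,
      show ¬(33 ≤ q) from by omega, show ¬(37 ≤ q) from by omega,
      show ¬(41 ≤ q) from by omega]
  · by_cases h1 : 41 < q
    · have e : clampQ q = 41 := by unfold clampQ; omega
      rw [e]
      simp [fukushuZoneIndex, fukushuZoneBounds,
        show (15 ≤ q) from by omega, show (20 ≤ q) from by omega,
        show (25 ≤ q) from by omega, show (29 ≤ q) from by omega,
        show (33 ≤ q) from by omega, show (37 ≤ q) from by omega,
        show (41 ≤ q) from by omega]
    · have e : clampQ q = q := by unfold clampQ; omega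
      rw [e]

theorem trimL (f_lo f_hi : Int) (h0 : f_lo < 0) (h1 : 0 ≤ f_hi) :
    ddFrom none ((PySem.List.pyRange f_lo (f_hi + 1) 1).map fukushuQKind)
    = ddFrom none ((PySem.List.pyRange 0 (f_hi + 1) 1).map fukushuQKind) := by
  rw [PySem.List.pyRange_one_append f_lo 0 (f_hi + 1) (by omega) (by omega),
    List.map_append,
    const_map fukushuQKind f_lo 0 "ikou" (fun q _ hq => kind_nonpos q (by omega)),
    PySem.List.pyRange_one_cons (by omega : (0:Int) < f_hi + 1), List.map_cons,
    kind_nonpos 0 le_rfl, ddrep]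

theorem trimR (f_lo f_hi : Int) (h0 : f_lo ≤ 41) (h1 : 41 < f_hi) :
    ddFrom none ((PySem.List.pyRange f_lo (f_hi + 1) 1).map fukushuQKind)
    = ddFrom none ((PySem.List.pyRange f_lo 42 1).map fukushuQKind) := by
  rw [PySem.List.pyRange_one_append f_lo 42 (f_hi + 1) (by omega) (by omega),
    List.map_append,
    const_map fukushuQKind 42 (f_hi + 1) "ikou" (fun q hq _ => kind_ge q (by omega)),
    show (42:Int) = 41 + 1 from rfl,
    PySem.List.pyRange_one_succ_right (by omega : f_lo ≤ (41:Int)),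
    List.map_append, List.map_cons, List.map_nil, kind_ge 41 le_rfl,
    List.append_assoc, List.singleton_append, ddrepR]

theorem mapkind_clamp (f_lo f_hi : Int) (h : f_lo ≤ f_hi) :
    ddFrom none ((PySem.List.pyRange f_lo (f_hi + 1) 1).map fukushuQKind)
    = ddFrom none ((PySem.List.pyRange (clampQ f_lo) (clampQ f_hi + 1) 1).map fukushuQKind) := by
  by_cases hA : f_hi ≤ 0
  · have e1 : clampQ f_lo = 0 := by unfold clampQ; omega
    have e2 : clampQ f_hi = 0 := by unfold clampQ; omega
    rw [e1, e2,
      const_map fukushuQKind f_lo (f_hi + 1) "ikou" (fun q _ hq => kind_nonpos q (by omega)),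
      show (f_hi + 1 - f_lo).toNat = (f_hi - f_lo).toNat + 1 from by omega,
      List.replicate_succ',
      show (List.replicate (f_hi - f_lo).toNat "ikou" ++ ["ikou"] : List String)
        = List.replicate (f_hi - f_lo).toNat "ikou" ++ ("ikou" :: []) from rfl,
      ddrep]
    decide
  · by_cases hB : 41 ≤ f_lo
    · have e1 : clampQ f_lo = 41 := by unfold clampQ; omega
      have e2 : clampQ f_hi = 41 := by unfold clampQ; omega
      rw [e1, e2,
        const_map fukushuQKind f_lo (f_hi + 1) "ikou" (fun q hq _ => kind_ge q (by omega)),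
        show (f_hi + 1 - f_lo).toNat = (f_hi - f_lo).toNat + 1 from by omega,
        List.replicate_succ',
        show (List.replicate (f_hi - f_lo).toNat "ikou" ++ ["ikou"] : List String)
          = List.replicate (f_hi - f_lo).toNat "ikou" ++ ("ikou" :: []) from rfl,
        ddrep]
      decide
    · -- 0 < f_hi and f_lo ≤ 40
      have e1 : clampQ f_lo = max 0 f_lo := by unfold clampQ; omega
      have e2 : clampQ f_hi = min f_hi 41 := by unfold clampQ; omega
      rw [e1, e2]
      by_cases hL : f_lo < 0
      · rw [show max 0 f_lo = 0 from by omega, trimL f_lo f_hi hL (by omega)]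
        by_cases hR : 41 < f_hi
        · rw [show min f_hi 41 + 1 = 42 from by omega]
          exact trimR 0 f_hi (by omega) hR
        · rw [show min f_hi 41 = f_hi from by omega]
      · rw [show max 0 f_lo = f_lo from by omega]
        by_cases hR : 41 < f_hi
        · rw [show min f_hi 41 + 1 = 42 from by omega]
          exact trimR f_lo f_hi (by omega) hR
        · rw [show min f_hi 41 = f_hi from by omega]

theorem grid : ∀ (a b : Fin 42), (a : Int) ≤ (b : Int) →
    ddFrom none ((PySem.List.pyRange (a : Int) ((b : Int) + 1) 1).map fukushuQKind)
    = PySem.List.slice fukushuZoneKinds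
        (some (fukushuZoneIndex (a : Int))) (some (fukushuZoneIndex (b : Int) + 1)) := by
  decide

-- ===== VERDICT (by name: the statement is the Claim_ definition above) =====
theorem fukushu_section_lead_for_range_spec : Claim_equal_fukushu_section_lead_for_range := by
  intro f_lo f_hi _
  unfold Spec_fukushu_section_lead_for_range
  unfold fukushu_section_lead_for_range fukushu_section_lead_for_range_alt
  by_cases h : f_hi < f_lo
  · rw [PySem.List.pyRange_one_eq_nil (by omega), if_pos h]
    decide
  · have h : f_lo ≤ f_hi := by omega
    rw [if_neg (by omega)]
    simp only [seen_foldl, List.nil_append]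
    rw [mapkind_clamp f_lo f_hi h, zi_clamp f_lo, zi_clamp f_hi]
    have hlo : 0 ≤ clampQ f_lo ∧ clampQ f_lo < 42 := by unfold clampQ; omega
    have hhi : 0 ≤ clampQ f_hi ∧ clampQ f_hi < 42 := by unfold clampQ; omega
    have hle : clampQ f_lo ≤ clampQ f_hi := by unfold clampQ; omega
    have ea : ((⟨(clampQ f_lo).toNat, by omega⟩ : Fin 42) : Int) = clampQ f_lo := by
      simp; omega
    have eb : ((⟨(clampQ f_hi).toNat, by omega⟩ : Fin 42) : Int) = clampQ f_hi := by
      simp; omega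
    have hg := grid ⟨(clampQ f_lo).toNat, by omega⟩ ⟨(clampQ f_hi).toNat, by omega⟩
      (by rw [ea, eb]; exact hle)
    rw [ea, eb] at hg
    rw [hg]
    rfl
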